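-- pv_equiv track=rewrite | github.com/Shimo-1999/bonsai | Other/k進数bit全探索.py | k_zentansaku
-- ===== SOURCE A (Python) =====
-- def k_zentansaku(n, k):
--     """
--     k ** n 個の重複順列を生成
--     k = 2 なら bit 全探索
--     """
--     ret = [[None for _j in range(n)] for _i in range(k ** n)]
--     for i in range(k ** n):
--         tmp = i
--         for j in reversed(range(n)):
--             ret[i][j] = tmp % k
--             tmp //= k
--     return ret
--
-- k = 4
--
-- n = 3
-- ===== SOURCE B (Python) =====
-- def k_zentansaku(n, k):
--     """
--     k ** n 個の重複順列を生成
--     k = 2 なら bit 全探索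
--     """
--     ret = [[]]
--     for _ in range(n):
--         ret = [row + [d] for row in ret for d in range(k)]
--         if not ret:
--             break
--     return ret
-- ===== Notes on version B (the rewrite author's own statement) =====
-- stated objective: simpler
-- what changed: B grows all length-j prefixes by one digit per pass (n passes of a cartesian extension) instead of decoding each of the k**n integer indices digit-by-digit with % and //.
-- intended difference: For k < 0 with even n >= 2, A returns k**n rows of nonpositive floor-mod 'digits' (an artefact of Python's % with a negative divisor), while B returns [] because there are no digits in range(k); an empty enumeration is the intended value for a negative base. — e.g. on k_zentansaku(2, -2): A returns [[0, 0], [-1, -1], [-1, 0], [0, -1]], B returns []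
import Mathlib
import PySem

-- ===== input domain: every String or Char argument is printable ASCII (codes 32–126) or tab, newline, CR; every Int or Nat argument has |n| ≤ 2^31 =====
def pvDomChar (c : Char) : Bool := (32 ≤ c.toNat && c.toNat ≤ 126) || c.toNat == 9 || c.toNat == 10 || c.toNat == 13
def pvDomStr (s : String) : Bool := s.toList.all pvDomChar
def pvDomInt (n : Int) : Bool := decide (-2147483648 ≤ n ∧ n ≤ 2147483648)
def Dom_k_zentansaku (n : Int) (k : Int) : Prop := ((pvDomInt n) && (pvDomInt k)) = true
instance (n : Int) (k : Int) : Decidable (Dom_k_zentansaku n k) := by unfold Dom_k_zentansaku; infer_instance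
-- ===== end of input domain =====

-- B builds the sequences by extending every prefix with each digit (n cartesian passes)
-- instead of A's per-index %// decoding: simpler, same cost; return-value equivalence only.

-- ===== PORT A =====
-- inner loop 'for j in reversed(range(n)): ret[i][j] = tmp % k; tmp //= k'
-- writes tmp % k at the rightmost unfilled position, then recurses on tmp // k.
def pvDigitsA (k : Int) : Nat → Int → List Int
  | 0, _ => []
  | m + 1, tmp => pvDigitsA k m (PySem.Int.floordiv tmp k) ++ [PySem.Int.mod tmp k]

def k_zentansaku (n : Int) (k : Int) : List (List Int) :=
  (PySem.List.pyRange 0 (k ^ n.toNat) 1).map (fun i => pvDigitsA k n.toNat i)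

-- ===== PORT B =====
-- 'for _ in range(n)' counts iterations; 'if not ret: break' stops once no sequence remains
def pvAltLoop (k : Int) : Nat → List (List Int) → List (List Int)
  | 0, ret => ret
  | m + 1, ret =>
      let ret' := ret.flatMap (fun row => (PySem.List.pyRange 0 k 1).map (fun d => row ++ [d]))
      if ret' = [] then ret' else pvAltLoop k m ret'

def k_zentansaku_alt (n : Int) (k : Int) : List (List Int) :=
  pvAltLoop k n.toNat [[]]

-- ===== PRECONDITION & SPEC =====
-- A raises for every n < 0 (range over a float power, or ZeroDivisionError for k = 0).
def Pre_k_zentansaku (n : Int) (k : Int) : Prop := 0 ≤ n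
instance (n : Int) (k : Int) : Decidable (Pre_k_zentansaku n k) := by unfold Pre_k_zentansaku; infer_instance
def pvWitness_k_zentansaku : Int × Int := (2, 3)

-- For k < 0 with even n ≥ 2, A returns k**n rows of nonpositive floor-mod 'digits' (an artefact
-- of Python's % with a negative divisor), while B returns [] since range(k) holds no digits;
-- the empty enumeration is the intended value for a negative base.
def D_k_zentansaku (n : Int) (k : Int) : Prop := k < 0 ∧ 2 ≤ n ∧ n % 2 = 0
instance (n : Int) (k : Int) : Decidable (D_k_zentansaku n k) := by unfold D_k_zentansaku; infer_instance

def Spec_k_zentansaku (n : Int) (k : Int) (out : List (List Int)) : Prop :=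
  ¬ D_k_zentansaku n k → out = k_zentansaku_alt n k
instance (n : Int) (k : Int) (out : List (List Int)) : Decidable (Spec_k_zentansaku n k out) := by
  unfold Spec_k_zentansaku; infer_instance

def pvDiffWitness_k_zentansaku : Int × Int := (2, -2)
def pvDiffWitnessOut_k_zentansaku : (List (List Int)) × (List (List Int)) :=
  ([[0, 0], [-1, -1], [-1, 0], [0, -1]], [])

-- ===== CLAIM (what is proved, stated in full; the proofs are below) =====
def Claim_unchanged_k_zentansaku : Prop := ∀ (n : Int) (k : Int), Dom_k_zentansaku n k → Pre_k_zentansaku n k → Spec_k_zentansaku n k (k_zentansaku n k)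
def Claim_changed_k_zentansaku : Prop := Dom_k_zentansaku (pvDiffWitness_k_zentansaku.1) (pvDiffWitness_k_zentansaku.2) ∧ Pre_k_zentansaku (pvDiffWitness_k_zentansaku.1) (pvDiffWitness_k_zentansaku.2) ∧ D_k_zentansaku (pvDiffWitness_k_zentansaku.1) (pvDiffWitness_k_zentansaku.2) ∧ k_zentansaku (pvDiffWitness_k_zentansaku.1) (pvDiffWitness_k_zentansaku.2) = pvDiffWitnessOut_k_zentansaku.1 ∧ k_zentansaku_alt (pvDiffWitness_k_zentansaku.1) (pvDiffWitness_k_zentansaku.2) = pvDiffWitnessOut_k_zentansaku.2 ∧ pvDiffWitnessOut_k_zentansaku.1 ≠ pvDiffWitnessOut_k_zentansaku.2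
def Claim_exact_k_zentansaku : Prop := ∀ (n : Int) (k : Int), Dom_k_zentansaku n k → Pre_k_zentansaku n k → D_k_zentansaku n k → k_zentansaku n k ≠ k_zentansaku_alt n k

-- ===== LEMMAS AND PROOFS =====

-- B's one-pass step
def pvStep (k : Int) (ret : List (List Int)) : List (List Int) :=
  ret.flatMap (fun row => (PySem.List.pyRange 0 k 1).map (fun d => row ++ [d]))

theorem pvAltLoop_eq_iter (k : Int) (hk : 1 ≤ k) :
    ∀ (m : Nat) (ret : List (List Int)), ret ≠ [] → pvAltLoop k m ret = (pvStep k)^[m] ret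
  | 0, ret, _ => rfl
  | m + 1, ret, hne => by
    obtain ⟨r, t, rfl⟩ : ∃ r t, ret = r :: t := by
      cases ret with
      | nil => exact absurd rfl hne
      | cons r t => exact ⟨r, t, rfl⟩
    have hcons := PySem.List.pyRange_one_cons (show (0:Int) < k by omega)
    rw [pvAltLoop]
    simp only [hcons, List.flatMap_cons, List.map_cons]
    rw [if_neg (by simp)]
    rw [pvAltLoop_eq_iter k hk m _ (by simp), Function.iterate_succ_apply]
    congr 1
    simp [pvStep, hcons]

theorem pvAlt_eq_iter (n k : Int) (hk : 1 ≤ k) :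
    k_zentansaku_alt n k = (pvStep k)^[n.toNat] [[]] := by
  rw [k_zentansaku_alt, pvAltLoop_eq_iter k hk n.toNat [[]] (by simp)]

theorem pvStep_nonpos (n k : Int) (hn : 1 ≤ n) (hk : k ≤ 0) :
    k_zentansaku_alt n k = [] := by
  rw [k_zentansaku_alt]
  obtain ⟨m, hm⟩ : ∃ m : Nat, n.toNat = m + 1 := ⟨n.toNat - 1, by omega⟩
  rw [hm, pvAltLoop]
  simp [PySem.List.pyRange_one_eq_nil (by omega : k ≤ 0)]

theorem pvDecodeStep (k i d : Int) (hk : 1 ≤ k) (hd0 : 0 ≤ d) (hdk : d < k) (m : Nat) :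
    pvDigitsA k (m + 1) (k * i + d) = pvDigitsA k m i ++ [d] := by
  have hfd : PySem.Int.floordiv (k * i + d) k = i := by
    rw [PySem.Int.floordiv_eq_ediv_of_pos (by omega)]
    rw [show k * i + d = d + i * k by ring, Int.add_mul_ediv_right _ _ (by omega : k ≠ 0),
      Int.ediv_eq_zero_of_lt hd0 hdk, zero_add]
  have hmd : PySem.Int.mod (k * i + d) k = d := by
    rw [PySem.Int.mod_eq_emod_of_pos (by omega)]
    rw [show k * i + d = d + i * k by ring, Int.add_mul_emod_self_right,
      Int.emod_eq_of_lt hd0 hdk]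
  simp [pvDigitsA, hfd, hmd]

theorem pvRangeMul (k : Int) (hk : 1 ≤ k) (a : Int) (ha : 0 ≤ a) :
    PySem.List.pyRange 0 (k * a) 1 =
      (PySem.List.pyRange 0 a 1).flatMap
        (fun i => (PySem.List.pyRange 0 k 1).map (fun d => k * i + d)) := by
  induction a, ha using Int.le_induction with
  | base => simp [PySem.List.pyRange_one_eq_nil (le_refl 0)]
  | succ a ha' ih =>
    rw [PySem.List.pyRange_one_succ_right ha', List.flatMap_append, ← ih]
    have hsplit : PySem.List.pyRange 0 (k * (a + 1)) 1 =
        PySem.List.pyRange 0 (k * a) 1 ++ PySem.List.pyRange (k * a) (k * (a + 1)) 1 :=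
      PySem.List.pyRange_one_append 0 (k * a) (k * (a + 1)) (by positivity) (by nlinarith)
    rw [hsplit]
    congr 1
    rw [PySem.List.pyRange_one, PySem.List.pyRange_one]
    simp only [List.flatMap_cons, List.flatMap_nil, List.append_nil, List.map_map]
    have : (k * (a + 1) - k * a) = k - 0 := by ring
    rw [this]
    refine List.map_congr_left fun j _ => ?_
    simp

theorem pvMain (k : Int) (hk : 1 ≤ k) (m : Nat) :
    (pvStep k)^[m] [[]] = (PySem.List.pyRange 0 (k ^ m) 1).map (fun i => pvDigitsA k m i) := by
  induction m with
  | zero =>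
    rw [Function.iterate_zero_apply, pow_zero,
      PySem.List.pyRange_one_cons (by omega : (0:Int) < 1),
      PySem.List.pyRange_one_eq_nil (by omega : (1:Int) ≤ 0 + 1)]
    rfl
  | succ m ih =>
    rw [Function.iterate_succ_apply', ih, pow_succ, mul_comm (k ^ m) k,
      pvRangeMul k hk (k ^ m) (by positivity), List.map_flatMap]
    unfold pvStep
    rw [List.flatMap_map]
    refine List.flatMap_congr fun i _ => ?_
    rw [List.map_map]
    refine List.map_congr_left fun d hd => ?_
    have hd' := (PySem.List.mem_pyRange_one).1 hd
    exact (pvDecodeStep k i d hk hd'.1 hd'.2 m).symm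

-- ===== VERDICT (by name: the statement is the Claim_ definition above) =====

theorem k_zentansaku_spec : Claim_unchanged_k_zentansaku := by
  intro n k _ hpre hnd
  unfold Pre_k_zentansaku at hpre
  unfold D_k_zentansaku at hnd
  by_cases hk : 1 ≤ k
  · -- 1 ≤ k
    rw [pvAlt_eq_iter n k hk, pvMain k hk, k_zentansaku]
  · -- k ≤ 0
    replace hk : k ≤ 0 := by omega
    rcases eq_or_lt_of_le hpre with hn0 | hn1
    · -- n = 0
      have h1 : PySem.List.pyRange 0 (k ^ (0:Int).toNat) 1 = [0] := by
        norm_num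
        rw [PySem.List.pyRange_one_cons (by omega : (0:Int) < 1),
          PySem.List.pyRange_one_eq_nil (by omega : (1:Int) ≤ 0 + 1)]
      rw [← hn0, k_zentansaku, h1]
      rfl
    · -- 1 ≤ n, k ≤ 0
      rw [pvStep_nonpos n k (by omega) (by omega), k_zentansaku]
      have hle : k ^ n.toNat ≤ 0 := by
        rcases eq_or_lt_of_le (by omega : k ≤ 0) with h0 | hneg
        · rw [h0, zero_pow (by omega : n.toNat ≠ 0)]
        · have hodd : Odd n.toNat := by
            rcases Nat.even_or_odd n.toNat with he | ho
            · exfalso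
              apply hnd
              have hdvd : (2:Int) ∣ n := by
                rcases he with ⟨c, hc⟩
                exact ⟨(c : Int), by omega⟩
              exact ⟨hneg, by omega, by omega⟩
            · exact ho
          exact le_of_lt (Odd.pow_neg hodd hneg)
      rw [PySem.List.pyRange_one_eq_nil (by omega), List.map_nil]

theorem k_zentansaku_changed : Claim_changed_k_zentansaku := by
  unfold Claim_changed_k_zentansaku; decide

theorem k_zentansaku_tight : Claim_exact_k_zentansaku := by
  intro n k _ hpre hd
  obtain ⟨hk, hn2, hpar⟩ := hd
  rw [pvStep_nonpos n k (by omega) (by omega), k_zentansaku]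
  have heven : Even n.toNat := by
    have : (2:Int) ∣ n := by omega
    rcases this with ⟨c, hc⟩
    exact ⟨c.toNat, by omega⟩
  have hpos : 0 < k ^ n.toNat := heven.pow_pos (by omega : k ≠ 0)
  rw [PySem.List.pyRange_one_cons (by omega : (0:Int) < k ^ n.toNat)]
  simp
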